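-- pv_equiv track=rewrite | github.com/laazer/blobert | .lefthook/scripts/py_asset_policy_check.py | _strip_py_strings
-- ===== SOURCE A (Python) =====
-- from typing import List, Set, Tuple
--
-- def _strip_py_strings(line: str) -> str:
--     out: List[str] = []
--     i = 0
--     n = len(line)
--     while i < n:
--         c = line[i]
--         if c in "\"'":
--             quote = c
--             out.append(" ")
--             i += 1
--             while i < n:
--                 if line[i] == "\\" and i + 1 < n:
--                     i += 2
--                     continue
--                 if line[i] == quote:
--                     i += 1
--                     break
--                 i += 1
--             continue
--         out.append(c)
--         i += 1
--     return "".join(out)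
-- ===== SOURCE B (Python) =====
-- def _strip_py_strings(line: str) -> str:
--     out = []
--     quote = None   # current string delimiter, or None when outside a literal
--     esc = False    # inside a literal: previous char was an escaping backslash
--     for c in line:
--         if quote is None:
--             if c in "\"'":
--                 quote = c
--                 out.append(" ")
--             else:
--                 out.append(c)
--         elif esc:
--             esc = False
--         elif c == "\\":
--             esc = True
--         elif c == quote:
--             quote = None
--     return "".join(out)
-- ===== Notes on version B (the rewrite author's own statement) =====
-- stated objective: simpler
-- what changed: Replaces the index-driven outer while loop with a nested literal-consuming scanner by a single flat character loop over a three-valued automaton state (outside / inside-literal / escape-pending).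
import Mathlib
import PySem

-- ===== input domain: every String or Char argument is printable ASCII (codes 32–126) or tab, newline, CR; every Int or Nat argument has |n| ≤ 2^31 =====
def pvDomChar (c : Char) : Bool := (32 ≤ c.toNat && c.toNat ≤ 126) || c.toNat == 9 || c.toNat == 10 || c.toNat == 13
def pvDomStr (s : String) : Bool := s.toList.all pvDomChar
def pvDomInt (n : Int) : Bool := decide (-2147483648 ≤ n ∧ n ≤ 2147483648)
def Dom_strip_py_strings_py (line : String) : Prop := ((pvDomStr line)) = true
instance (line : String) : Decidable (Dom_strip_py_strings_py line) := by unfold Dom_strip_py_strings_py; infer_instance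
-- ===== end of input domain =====

-- B replaces A's index-based outer loop with a nested literal scanner by one flat
-- character loop over an automaton state (outside / in-literal / escape-pending): simpler.

-- ===== PORT A =====
-- inner while loop of A: given the open quote and the rest of the line (from index i),
-- consume the string literal (an escape skips two chars; the closing quote is consumed)
-- and return the remaining suffix of the line.
def aInner (q : Char) : List Char → List Char
  | [] => []
  | '\\' :: _ :: rest' => aInner q rest'              -- line[i] == '\\' and i+1 < n: i += 2
  | c :: rest => if c = q then rest else aInner q rest

theorem aInner_length_le (q : Char) (l : List Char) : (aInner q l).length ≤ l.length := by
  induction l using aInner.induct q with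
  | case1 => simp [aInner]
  | case2 d rest' ih => simp only [aInner]; simp; omega
  | case3 rest h => simp [aInner]
  | case4 c rest h hc ih => simp only [aInner, if_neg hc]; simp; omega

-- outer while loop of A, building `out`
def aOuter : List Char → List Char
  | [] => []
  | c :: rest =>
    if c = '"' ∨ c = '\'' then ' ' :: aOuter (aInner c rest)   -- out.append(" "); skip the literal
    else c :: aOuter rest                                      -- out.append(c)
  termination_by l => l.length
  decreasing_by
  · have := aInner_length_le c rest; simp; omega
  · simp

def strip_py_strings_py (line : String) : String := String.ofList (aOuter line.toList)

-- ===== PORT B =====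
-- one step of B's loop body: state = ((current quote or none, escape pending), out)
def bStep (st : (Option Char × Bool) × List Char) (c : Char) : (Option Char × Bool) × List Char :=
  match st with
  | ((none, _), out) =>
    if c = '"' ∨ c = '\'' then ((some c, false), out ++ [' '])
    else ((none, false), out ++ [c])
  | ((some q, true), out) => ((some q, false), out)
  | ((some q, false), out) =>
    if c = '\\' then ((some q, true), out)
    else if c = q then ((none, false), out)
    else ((some q, false), out)

def strip_py_strings_py_alt (line : String) : String :=
  String.ofList (line.toList.foldl bStep ((none, false), [])).2

-- ===== PRECONDITION & SPEC =====
def Spec_strip_py_strings_py (line : String) (out : String) : Prop := out = strip_py_strings_py_alt line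
instance (line : String) (out : String) : Decidable (Spec_strip_py_strings_py line out) := by unfold Spec_strip_py_strings_py; infer_instance

-- ===== CLAIM (what is proved, stated in full; the proofs are below) =====
def Claim_equal_strip_py_strings_py : Prop := ∀ (line : String), Dom_strip_py_strings_py line → Spec_strip_py_strings_py line (strip_py_strings_py line)

-- ===== LEMMAS AND PROOFS =====

-- running B's automaton from the in-literal state over l produces the same output as
-- skipping past the literal (A's inner loop) and continuing from the outside state
theorem inner_fold (q : Char) (hq : q = '"' ∨ q = '\'') :
    ∀ (l : List Char) (out : List Char),
      (l.foldl bStep ((some q, false), out)).2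
        = ((aInner q l).foldl bStep ((none, false), out)).2 := by
  have hqb : q ≠ '\\' := by rcases hq with h | h <;> simp [h]
  intro l
  induction l using aInner.induct q with
  | case1 => intro out; simp [aInner]
  | case2 d rest' ih =>
    intro out
    simpa [aInner, bStep, hqb.symm] using ih out
  | case3 rest h =>
    intro out
    simp [aInner, bStep, hqb]
  | case4 c rest h hc ih =>
    intro out
    by_cases hb : c = '\\'
    · subst hb
      have hrest : rest = [] := by
        cases rest with
        | nil => rfl
        | cons d r => exact (h d r rfl rfl).elim
      subst hrest
      simp [aInner, bStep, hc]
    · simpa [aInner, bStep, hb, hc] using ih out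

-- B's full fold from the outside state computes `out ++` A's outer loop result
theorem outer_fold :
    ∀ (l : List Char) (out : List Char),
      (l.foldl bStep ((none, false), out)).2 = out ++ aOuter l := by
  intro l
  induction l using aOuter.induct with
  | case1 => intro out; simp [aOuter]
  | case2 c rest hq ih =>
    intro out
    rw [aOuter, if_pos hq]
    simp only [List.foldl, bStep, if_pos hq]
    rw [inner_fold c hq rest (out ++ [' ']), ih (out ++ [' '])]
    simp
  | case3 c rest hq ih =>
    intro out
    rw [aOuter, if_neg hq]
    simp only [List.foldl, bStep, if_neg hq]
    rw [ih (out ++ [c])]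
    simp

-- ===== VERDICT (by name: the statement is the Claim_ definition above) =====
theorem strip_py_strings_py_spec : Claim_equal_strip_py_strings_py := by
  intro line _
  unfold Spec_strip_py_strings_py strip_py_strings_py strip_py_strings_py_alt
  rw [outer_fold]
  rfl
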